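-- pv_equiv track=rewrite | github.com/aniketk33/LeetcodeSolutions | heap/process-tasks.py | process_tasks
-- ===== SOURCE A (Python) =====
-- import heapq
--
-- def process_tasks(servers, tasks):
--     result = []
--
--     # create available server's heap [weight, idx]
--     avail_servers = [(val, idx) for idx, val in enumerate(servers)]
--     heapq.heapify(avail_servers)
--
--     # create unavailable server's list [time_when_it_becomes_free, weight, idx]
--     # initially all the servers are available
--     unavail_servers = []
--
--     curr_time = 0
--     for i, task_time in enumerate(tasks):
--         curr_time = max(curr_time, i)
--
--         # check if no server is available to process the task then fast-forward the time to the
--         # first server in the unavailable server's list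
--         if not avail_servers:
--             curr_time = unavail_servers[0][0]
--
--         # check if any server is going to be free soon from the unavailable server's list
--         # and add them to the available server's list
--         while unavail_servers and curr_time >= unavail_servers[0][0]:
--             free_time, weight, idx = heapq.heappop(unavail_servers)
--             heapq.heappush(avail_servers, (weight, idx))
--
--         # mark the free server as busy
--         weight, idx = heapq.heappop(avail_servers)
--         total_task_time = task_time + curr_time
--         heapq.heappush(unavail_servers, (total_task_time, weight, idx))
--         result.append(idx)
--
--     return result
-- ===== SOURCE B (Python) =====
-- def process_tasks(servers, tasks):
--     # Heap-free simulation: an explicit set of idle servers plus a dict mapping each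
--     # busy server to the time it becomes free; each task does linear min-scans.
--     n = len(servers)
--     available = set(range(n))
--     busy = {}  # idx -> time when the server becomes free
--     curr_time = 0
--     result = []
--     for i, task_time in enumerate(tasks):
--         curr_time = max(curr_time, i)
--         if not available:
--             curr_time = min(busy.values())
--         for idx in [j for j, free in busy.items() if free <= curr_time]:
--             del busy[idx]
--             available.add(idx)
--         idx = min(available, key=lambda j: (servers[j], j))
--         available.remove(idx)
--         busy[idx] = curr_time + task_time
--         result.append(idx)
--     return result
-- ===== Notes on version B (the rewrite author's own statement) =====
-- stated objective: alternative
-- what changed: Replaces both heapq priority queues by an explicit set of idle server indices plus a dict mapping each busy server to its release time, with linear min-scans (min over the idle set by (weight, idx), min over the dict's release times) instead of heap pops. Pre_ excludes only empty servers with nonempty tasks, on which A raises IndexError (heappop from an empty heap) and B raises ValueError (min of an empty set).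
import Mathlib
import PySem

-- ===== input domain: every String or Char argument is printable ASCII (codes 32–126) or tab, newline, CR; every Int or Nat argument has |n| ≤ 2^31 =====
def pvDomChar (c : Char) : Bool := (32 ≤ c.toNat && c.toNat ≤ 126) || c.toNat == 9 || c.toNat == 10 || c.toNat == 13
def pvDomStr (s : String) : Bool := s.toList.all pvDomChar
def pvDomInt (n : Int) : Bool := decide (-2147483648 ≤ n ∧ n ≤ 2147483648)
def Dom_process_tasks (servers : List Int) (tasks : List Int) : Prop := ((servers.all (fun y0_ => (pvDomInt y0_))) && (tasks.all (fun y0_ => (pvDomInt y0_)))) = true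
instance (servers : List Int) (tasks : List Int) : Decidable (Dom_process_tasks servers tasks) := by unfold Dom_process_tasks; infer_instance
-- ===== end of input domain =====

-- B replaces A's two heaps by an idle-server set plus a busy dict (idx -> free time)
-- with linear min-scans: a different data structure of similar cost (not claimed faster).

-- ===== PORT A =====
-- heapq is modeled as a multiset: heappush conses, heappop removes the least element
-- (tuples compared lexicographically, as in Python), and [0] peeks the least element;
-- this is exact for the operations A performs on its heaps (emptiness test, [0], pop, push).
def pvLe2 (a b : Int × Int) : Bool := decide (a.1 < b.1 ∨ (a.1 = b.1 ∧ a.2 ≤ b.2))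
def pvLe3 (a b : Int × Int × Int) : Bool :=
  decide (a.1 < b.1 ∨ (a.1 = b.1 ∧ (a.2.1 < b.2.1 ∨ (a.2.1 = b.2.1 ∧ a.2.2 ≤ b.2.2))))

-- heappop on the multiset model: remove the least element
def pvPopMin2 : List (Int × Int) → Option ((Int × Int) × List (Int × Int))
  | [] => none
  | x :: xs =>
    match pvPopMin2 xs with
    | none => some (x, [])
    | some (m, r) => if pvLe2 x m then some (x, xs) else some (m, x :: r)

def pvPopMin3 : List (Int × Int × Int) → Option ((Int × Int × Int) × List (Int × Int × Int))
  | [] => none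
  | x :: xs =>
    match pvPopMin3 xs with
    | none => some (x, [])
    | some (m, r) => if pvLe3 x m then some (x, xs) else some (m, x :: r)

theorem pvPopMin3_none {l : List (Int × Int × Int)} (h : pvPopMin3 l = none) : l = [] := by
  cases l with
  | nil => rfl
  | cons x xs =>
    rw [pvPopMin3] at h
    split at h
    · exact absurd h (Option.some_ne_none _)
    · split at h <;> exact absurd h (Option.some_ne_none _)

-- cited by pvDrain's decreasing_by
theorem pvPopMin3_length : ∀ {l : List (Int × Int × Int)} {m r},
    pvPopMin3 l = some (m, r) → r.length + 1 = l.length := by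
  intro l
  induction l with
  | nil => intro m r h; simp [pvPopMin3] at h
  | cons x xs ih =>
    intro m r h
    rw [pvPopMin3] at h
    split at h
    · rename_i heq
      have : xs = [] := pvPopMin3_none heq
      simp at h
      simp [this, ← h.2]
    · rename_i m' r' heq
      split at h <;> simp at h
      · simp [← h.2]
      · have := ih heq
        simp [← h.2]
        omega

-- drain loop: `while unavail_servers and curr_time >= unavail_servers[0][0]: pop; push`
def pvDrain (avail : List (Int × Int)) (unavail : List (Int × Int × Int)) (c : Int) :
    List (Int × Int) × List (Int × Int × Int) :=
  match _h : pvPopMin3 unavail with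
  | none => (avail, unavail)
  | some (m, r) =>
    if m.1 ≤ c then pvDrain ((m.2.1, m.2.2) :: avail) r c else (avail, unavail)
termination_by unavail.length
decreasing_by have := pvPopMin3_length _h; omega

-- unavail_servers[0] (peek of the heap = least element); [0] of [] is IndexError, unreachable under Pre_
def pvPeek3 (l : List (Int × Int × Int)) : Int × Int × Int :=
  match pvPopMin3 l with
  | none => (0, 0, 0)
  | some (m, _) => m

def pvLoopA (servers : List Int) (tasks : List Int) (avail : List (Int × Int))
    (unavail : List (Int × Int × Int)) (curr i : Int) (acc : List Int) : List Int :=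
  match tasks with
  | [] => acc.reverse
  | t :: ts =>
    let c1 := max curr i
    let c2 := if avail.isEmpty then (pvPeek3 unavail).1 else c1
    let p := pvDrain avail unavail c2
    match pvPopMin2 p.1 with
    | none => acc.reverse   -- heappop from an empty heap: IndexError, unreachable under Pre_
    | some (wj, rest) =>
      pvLoopA servers ts rest ((t + c2, wj.1, wj.2) :: p.2) c2 (i + 1) (wj.2 :: acc)

def process_tasks (servers : List Int) (tasks : List Int) : List Int :=
  -- [(val, idx) for idx, val in enumerate(servers)]; heapify is a no-op on the multiset model
  pvLoopA servers tasks ((PySem.List.enumerate servers).map (fun p => (p.2, p.1))) [] 0 0 []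

-- ===== PORT B =====
def pvLoopB (servers : List Int) (tasks : List Int) (available : PySem.Set Int)
    (busy : PySem.Dict Int Int) (curr i : Int) (acc : List Int) : List Int :=
  match tasks with
  | [] => acc.reverse
  | t :: ts =>
    let c1 := max curr i
    -- `if not available: curr_time = min(busy.values())`; min([]) is ValueError, unreachable under Pre_
    let c2 := if available.isEmpty then (PySem.List.min? (PySem.Dict.values busy) (fun v => v)).getD c1 else c1
    -- `[j for j, free in busy.items() if free <= curr_time]`, then `del busy[idx]; available.add(idx)`
    let moved := (PySem.Dict.items busy).filter (fun p => decide (p.2 ≤ c2))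
    let busy2 := moved.foldl (fun d p => PySem.Dict.erase d p.1) busy
    let avail2 := moved.foldl (fun s p => PySem.Set.add s p.1) available
    -- `min(available, key=lambda j: (servers[j], j))`; j is always in range(len(servers))
    match PySem.List.min2? avail2 (fun j => servers.getD j.toNat 0) (fun j => j) with
    | none => acc.reverse   -- min of an empty set: ValueError, unreachable under Pre_
    | some jdx =>
      match PySem.Set.remove? avail2 jdx with
      | none => acc.reverse   -- KeyError, unreachable (jdx was just found in the set)
      | some avail3 =>
        pvLoopB servers ts avail3 (PySem.Dict.insert busy2 jdx (c2 + t)) c2 (i + 1) (jdx :: acc)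

def process_tasks_alt (servers : List Int) (tasks : List Int) : List Int :=
  -- available = set(range(n)); busy = {}
  pvLoopB servers tasks (PySem.Set.ofList ((List.range servers.length).map Int.ofNat))
    (PySem.Dict.mk []) 0 0 []

-- ===== PRECONDITION & SPEC =====
-- Pre_ excludes only empty `servers` with nonempty `tasks`, where A raises IndexError
-- (heappop from an empty heap) and B raises ValueError (min of an empty set).
def Pre_process_tasks (servers : List Int) (tasks : List Int) : Prop :=
  tasks = [] ∨ servers ≠ []
instance (servers : List Int) (tasks : List Int) : Decidable (Pre_process_tasks servers tasks) := by
  unfold Pre_process_tasks; infer_instance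

def pvWitness_process_tasks : List Int × List Int := ([3, 1], [2, 1, 2])

def Spec_process_tasks (servers : List Int) (tasks : List Int) (out : List Int) : Prop := out = process_tasks_alt servers tasks
instance (servers : List Int) (tasks : List Int) (out : List Int) : Decidable (Spec_process_tasks servers tasks out) := by unfold Spec_process_tasks; infer_instance

-- ===== CLAIM (what is proved, stated in full; the proofs are below) =====
def Claim_equal_process_tasks : Prop := ∀ (servers : List Int) (tasks : List Int), Dom_process_tasks servers tasks → Pre_process_tasks servers tasks → Spec_process_tasks servers tasks (process_tasks servers tasks)

-- ===== LEMMAS AND PROOFS =====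

-- the two key views: B's idle index j as A's avail pair, B's busy item (j, ft) as A's unavail triple
def pvF (servers : List Int) (j : Int) : Int × Int := (servers.getD j.toNat 0, j)
def pvG (servers : List Int) (p : Int × Int) : Int × Int × Int :=
  (p.2, servers.getD p.1.toNat 0, p.1)

def pvRangeInts (servers : List Int) : List Int :=
  (List.range servers.length).map Int.ofNat

theorem pvF_inj (servers : List Int) : Function.Injective (pvF servers) := by
  intro a b h
  have := congrArg Prod.snd h
  simpa [pvF] using this

theorem pvRangeInts_nodup (servers : List Int) : (pvRangeInts servers).Nodup := by
  unfold pvRangeInts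
  apply List.Nodup.map
  · intro a b h; exact Int.ofNat.inj h
  · exact List.nodup_range

-- order lemmas on the heap orders
theorem pvLe2_antisymm {a b : Int × Int} (h1 : pvLe2 a b = true) (h2 : pvLe2 b a = true) : a = b := by
  obtain ⟨a1, a2⟩ := a; obtain ⟨b1, b2⟩ := b
  simp [pvLe2] at h1 h2
  have : a1 = b1 ∧ a2 = b2 := by omega
  simp [this.1, this.2]

theorem pvPopMin2_none {l : List (Int × Int)} (h : pvPopMin2 l = none) : l = [] := by
  cases l with
  | nil => rfl
  | cons x xs =>
    rw [pvPopMin2] at h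
    split at h
    · exact absurd h (Option.some_ne_none _)
    · split at h <;> exact absurd h (Option.some_ne_none _)

theorem pvLe2_refl (a : Int × Int) : pvLe2 a a = true := by simp [pvLe2]

theorem pvLe2_trans {a b c : Int × Int} (h1 : pvLe2 a b = true) (h2 : pvLe2 b c = true) :
    pvLe2 a c = true := by simp [pvLe2] at *; omega

theorem pvLe2_of_not {a b : Int × Int} (h : pvLe2 a b = false) : pvLe2 b a = true := by
  simp [pvLe2] at *; omega

theorem pvLe3_refl (a : Int × Int × Int) : pvLe3 a a = true := by simp [pvLe3]

theorem pvLe3_trans {a b c : Int × Int × Int} (h1 : pvLe3 a b = true) (h2 : pvLe3 b c = true) :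
    pvLe3 a c = true := by simp [pvLe3] at *; omega

theorem pvLe3_of_not {a b : Int × Int × Int} (h : pvLe3 a b = false) : pvLe3 b a = true := by
  simp [pvLe3] at *; omega

theorem pvLe3_first {a b : Int × Int × Int} (h : pvLe3 a b = true) : a.1 ≤ b.1 := by
  simp [pvLe3] at h; omega

theorem pvPopMin2_spec : ∀ {l : List (Int × Int)} {m r},
    pvPopMin2 l = some (m, r) → (m :: r).Perm l ∧ ∀ x ∈ l, pvLe2 m x = true := by
  intro l
  induction l with
  | nil => intro m r h; simp [pvPopMin2] at h
  | cons x xs ih =>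
    intro m r h
    rw [pvPopMin2] at h
    split at h
    · rename_i heq
      have hx : xs = [] := pvPopMin2_none heq
      subst hx
      simp at h
      obtain ⟨h1, h2⟩ := h
      subst h1; subst h2
      exact ⟨List.Perm.refl _, by intro y hy; simp at hy; subst hy; exact pvLe2_refl _⟩
    · rename_i m' r' heq
      obtain ⟨hp, hm⟩ := ih heq
      split at h <;> rename_i hle <;> simp at h <;> obtain ⟨h1, h2⟩ := h <;> subst h1 h2
      · refine ⟨List.Perm.refl _, ?_⟩
        intro y hy
        rcases List.mem_cons.mp hy with rfl | hy
        · exact pvLe2_refl _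
        · exact pvLe2_trans hle (hm y hy)
      · constructor
        · exact (List.Perm.swap x m' r').trans (List.Perm.cons x hp)
        · intro y hy
          rcases List.mem_cons.mp hy with rfl | hy
          · exact pvLe2_of_not (by simpa using hle)
          · exact hm y hy

theorem pvPopMin3_spec : ∀ {l : List (Int × Int × Int)} {m r},
    pvPopMin3 l = some (m, r) → (m :: r).Perm l ∧ ∀ x ∈ l, pvLe3 m x = true := by
  intro l
  induction l with
  | nil => intro m r h; simp [pvPopMin3] at h
  | cons x xs ih =>
    intro m r h
    rw [pvPopMin3] at h
    split at h
    · rename_i heq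
      have hx : xs = [] := pvPopMin3_none heq
      subst hx
      simp at h
      obtain ⟨h1, h2⟩ := h
      subst h1; subst h2
      exact ⟨List.Perm.refl _, by intro y hy; simp at hy; subst hy; exact pvLe3_refl _⟩
    · rename_i m' r' heq
      obtain ⟨hp, hm⟩ := ih heq
      split at h <;> rename_i hle <;> simp at h <;> obtain ⟨h1, h2⟩ := h <;> subst h1 h2
      · refine ⟨List.Perm.refl _, ?_⟩
        intro y hy
        rcases List.mem_cons.mp hy with rfl | hy
        · exact pvLe3_refl _
        · exact pvLe3_trans hle (hm y hy)
      · constructor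
        · exact (List.Perm.swap x m' r').trans (List.Perm.cons x hp)
        · intro y hy
          rcases List.mem_cons.mp hy with rfl | hy
          · exact pvLe3_of_not (by simpa using hle)
          · exact hm y hy

-- drain moves exactly the entries with time ≤ c, as multisets
theorem pvDrain_spec : ∀ (unavail : List (Int × Int × Int)) (avail : List (Int × Int)) (c : Int),
    (pvDrain avail unavail c).1.Perm
      (avail ++ (unavail.filter (fun u => decide (u.1 ≤ c))).map (fun u => (u.2.1, u.2.2))) ∧
    (pvDrain avail unavail c).2.Perm (unavail.filter (fun u => !decide (u.1 ≤ c))) := by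
  intro unavail avail c
  fun_induction pvDrain avail unavail c with
  | case1 avail unavail h =>
    have : unavail = [] := pvPopMin3_none h
    subst this
    simp
  | case2 avail unavail m r h hle ih =>
    obtain ⟨hperm, hmin⟩ := pvPopMin3_spec h
    have hf1 : (unavail.filter (fun u => decide (u.1 ≤ c))).Perm
        (m :: r.filter (fun u => decide (u.1 ≤ c))) := by
      have := (hperm.filter (fun u => decide (u.1 ≤ c))).symm
      simpa [List.filter_cons, hle] using this
    have hf2 : (unavail.filter (fun u => !decide (u.1 ≤ c))).Perm
        (r.filter (fun u => !decide (u.1 ≤ c))) := by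
      have := (hperm.filter (fun u => !decide (u.1 ≤ c))).symm
      simpa [List.filter_cons, hle] using this
    refine ⟨ih.1.trans ?_, ih.2.trans hf2.symm⟩
    refine List.perm_middle.symm.trans (List.Perm.append_left avail ?_)
    have := (hf1.map (fun u => (u.2.1, u.2.2))).symm
    simpa using this
  | case3 avail unavail m r h hle =>
    obtain ⟨hperm, hmin⟩ := pvPopMin3_spec h
    have hgt : ∀ u ∈ unavail, ¬ u.1 ≤ c := by
      intro u hu hua
      exact hle (le_trans (pvLe3_first (hmin u hu)) hua)
    constructor
    · have : unavail.filter (fun u => decide (u.1 ≤ c)) = [] := by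
        rw [List.filter_eq_nil_iff]
        intro u hu
        simpa using hgt u hu
      simp [this]
    · have : unavail.filter (fun u => !decide (u.1 ≤ c)) = unavail := by
        rw [List.filter_eq_self]
        intro u hu
        simpa using hgt u hu
      simp [this]

-- folding Set.add over fresh distinct keys is plain append
theorem pvFoldAdd : ∀ (K s : List Int), (∀ k ∈ K, k ∉ s) → K.Nodup →
    K.foldl PySem.Set.add s = s ++ K := by
  intro K
  induction K with
  | nil => intro s _ _; simp
  | cons k K ih =>
    intro s hfresh hnd
    rw [List.foldl_cons, PySem.Set.add_of_not_mem (hfresh k (List.mem_cons_self ..))]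
    obtain ⟨hk, hnd'⟩ := List.nodup_cons.mp hnd
    rw [ih (s ++ [k]) ?_ hnd']
    · simp
    · intro x hx
      simp only [List.mem_append, List.mem_singleton]
      rintro (h | rfl)
      · exact hfresh x (List.mem_cons_of_mem _ hx) h
      · exact hk hx

-- folding Set.add over fresh distinct item keys is plain append
theorem pvFoldAddP : ∀ (K : List (Int × Int)) (s : List Int),
    (∀ k ∈ K.map Prod.fst, k ∉ s) → (K.map Prod.fst).Nodup →
    K.foldl (fun s p => PySem.Set.add s p.1) s = s ++ K.map Prod.fst := by
  intro K
  induction K with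
  | nil => intro s _ _; simp
  | cons k K ih =>
    intro s hfresh hnd
    rw [List.foldl_cons,
      PySem.Set.add_of_not_mem (hfresh k.1 (by simp))]
    rw [List.map_cons] at hnd
    obtain ⟨hk, hnd'⟩ := List.nodup_cons.mp hnd
    rw [ih (s ++ [k.1]) ?_ hnd']
    · simp
    · intro x hx
      simp only [List.mem_append, List.mem_singleton]
      rintro (h | rfl)
      · exact hfresh x (by rw [List.map_cons]; exact List.mem_cons_of_mem _ hx) h
      · exact hk hx

-- folding Dict.erase over item keys filters those keys out of the items
theorem pvFoldEraseP : ∀ (K : List (Int × Int)) (d : PySem.Dict Int Int),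
    (K.foldl (fun d p => PySem.Dict.erase d p.1) d).items =
      d.items.filter (fun p => !(K.map Prod.fst).contains p.1) := by
  intro K
  induction K with
  | nil => intro d; simp
  | cons k K ih =>
    intro d
    rw [List.foldl_cons, ih]
    show (PySem.Dict.erase d k.1).items.filter _ = _
    rw [PySem.Dict.erase]
    show (d.items.filter _).filter _ = _
    rw [List.filter_filter]
    apply List.filter_congr
    intro p _
    by_cases hpk : p.1 = k.1 <;> by_cases hpK : p.1 ∈ K.map Prod.fst <;>
      simp [hpk, hpK]

-- min2? with the key pair (k1, k2) is the unique pvLe2-least element of the mapped list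
def pvStep (servers : List Int) (acc : Option Int) (x : Int) : Option Int :=
  match acc with
  | none => some x
  | some m =>
    if (decide (servers.getD x.toNat 0 < servers.getD m.toNat 0) ||
        (!decide (servers.getD m.toNat 0 < servers.getD x.toNat 0) && decide (x < m))) = true
    then some x else some m

theorem pvMin2_spec (servers : List Int) : ∀ (lst : List Int) (a : Int),
    ∃ m, lst.foldl (pvStep servers) (some a) = some m ∧
      (m = a ∨ m ∈ lst) ∧ pvLe2 (pvF servers m) (pvF servers a) = true ∧
      ∀ x ∈ lst, pvLe2 (pvF servers m) (pvF servers x) = true := by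
  intro lst
  induction lst with
  | nil => intro a; exact ⟨a, rfl, Or.inl rfl, pvLe2_refl _, by simp⟩
  | cons x lst ih =>
    intro a
    rw [List.foldl_cons]
    by_cases hlt : (decide (servers.getD x.toNat 0 < servers.getD a.toNat 0) ||
        (!decide (servers.getD a.toNat 0 < servers.getD x.toNat 0) && decide (x < a))) = true
    · rw [show pvStep servers (some a) x = some x by rw [pvStep]; rw [if_pos hlt]]
      obtain ⟨m, heq, hmem, hma, hmin⟩ := ih x
      have hxa : pvLe2 (pvF servers x) (pvF servers a) = true := by
        simp only [Bool.or_eq_true, Bool.and_eq_true, Bool.not_eq_true',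
          decide_eq_true_eq, decide_eq_false_iff_not] at hlt
        simp only [pvLe2, pvF, decide_eq_true_eq]
        omega
      refine ⟨m, heq, ?_, pvLe2_trans hma hxa, ?_⟩
      · rcases hmem with rfl | h
        · exact Or.inr (List.mem_cons_self ..)
        · exact Or.inr (List.mem_cons_of_mem _ h)
      · intro y hy
        rcases List.mem_cons.mp hy with rfl | hy
        · exact hma
        · exact hmin y hy
    · rw [show pvStep servers (some a) x = some a by rw [pvStep]; rw [if_neg hlt]]
      obtain ⟨m, heq, hmem, hma, hmin⟩ := ih a
      have hax : pvLe2 (pvF servers a) (pvF servers x) = true := by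
        simp only [Bool.or_eq_true, Bool.and_eq_true, Bool.not_eq_true',
          decide_eq_true_eq, decide_eq_false_iff_not, not_or, not_and, not_lt] at hlt
        simp only [pvLe2, pvF, decide_eq_true_eq]
        omega
      refine ⟨m, heq, ?_, hma, ?_⟩
      · rcases hmem with rfl | h
        · exact Or.inl rfl
        · exact Or.inr (List.mem_cons_of_mem _ h)
      · intro y hy
        rcases List.mem_cons.mp hy with rfl | hy
        · exact pvLe2_trans hma hax
        · exact hmin y hy

theorem pvMin2_eq (servers : List Int) (lst : List Int) (hne : lst ≠ []) :
    ∃ m, PySem.List.min2? lst (fun j => servers.getD j.toNat 0) (fun j => j) = some m ∧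
      m ∈ lst ∧ ∀ x ∈ lst, pvLe2 (pvF servers m) (pvF servers x) = true := by
  have hfold : PySem.List.min2? lst (fun j => servers.getD j.toNat 0) (fun j => j) =
      lst.foldl (pvStep servers) none := by
    unfold PySem.List.min2? pvStep
    congr 1
    funext acc x
    cases acc <;> rfl
  cases lst with
  | nil => exact absurd rfl hne
  | cons a lst =>
    rw [hfold, List.foldl_cons, show pvStep servers none a = some a from rfl]
    obtain ⟨m, heq, hmem, hma, hmin⟩ := pvMin2_spec servers lst a
    refine ⟨m, heq, ?_, ?_⟩
    · rcases hmem with rfl | h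
      · exact List.mem_cons_self ..
      · exact List.mem_cons_of_mem _ h
    · intro y hy
      rcases List.mem_cons.mp hy with rfl | hy
      · exact hma
      · exact hmin y hy

-- existence forms
theorem pvPopMin2_some (l : List (Int × Int)) (h : l ≠ []) :
    ∃ m r, pvPopMin2 l = some (m, r) := by
  cases hp : pvPopMin2 l with
  | none => exact absurd (pvPopMin2_none hp) h
  | some p => exact ⟨p.1, p.2, by simp⟩

theorem pvPopMin3_some (l : List (Int × Int × Int)) (h : l ≠ []) :
    ∃ m r, pvPopMin3 l = some (m, r) := by
  cases hp : pvPopMin3 l with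
  | none => exact absurd (pvPopMin3_none hp) h
  | some p => exact ⟨p.1, p.2, by simp⟩

theorem pvMin?_isSome (l : List Int) (h : l ≠ []) :
    ∃ m, PySem.List.min? l (fun v => v) = some m := by
  cases hm : PySem.List.min? l (fun v => v) with
  | some m => exact ⟨m, rfl⟩
  | none => exact absurd ((PySem.List.min?_eq_none_iff l _).mp hm) h

theorem pvEnumerate_map : ∀ (l : List Int) (k : Int),
    (PySem.List.enumerate l k).map (fun p => (p.2, p.1)) =
      (List.range l.length).map (fun j => (l.getD j 0, (j : Int) + k)) := by
  intro l
  induction l with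
  | nil => intro k; simp [PySem.List.enumerate]
  | cons x xs ih =>
    intro k
    rw [PySem.List.enumerate]
    simp only [List.map_cons, List.length_cons, List.range_succ_eq_map, List.map_map,
      Function.comp_def, ih (k + 1)]
    congr 1
    · simp
    · apply List.map_congr_left
      intro j _
      simp
      ring

-- one-step unfoldings of the two loops, with the fast-forwarded time named
theorem pvLoopA_cons (servers : List Int) (t : Int) (ts : List Int) (avail : List (Int × Int))
    (unavail : List (Int × Int × Int)) (curr i : Int) (acc : List Int) (c2 : Int)
    (hc2 : (if avail.isEmpty then (pvPeek3 unavail).1 else max curr i) = c2) :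
    pvLoopA servers (t :: ts) avail unavail curr i acc =
      match pvPopMin2 (pvDrain avail unavail c2).1 with
      | none => acc.reverse
      | some (wj, rest) =>
          pvLoopA servers ts rest ((t + c2, wj.1, wj.2) :: (pvDrain avail unavail c2).2) c2 (i + 1)
            (wj.2 :: acc) := by
  subst hc2; rfl

theorem pvLoopB_cons (servers : List Int) (t : Int) (ts : List Int) (available : PySem.Set Int)
    (busy : PySem.Dict Int Int) (curr i : Int) (acc : List Int) (c2 : Int)
    (hc2 : (if available.isEmpty then
        (PySem.List.min? (PySem.Dict.values busy) (fun v => v)).getD (max curr i)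
      else max curr i) = c2) :
    pvLoopB servers (t :: ts) available busy curr i acc =
      match PySem.List.min2?
          (((PySem.Dict.items busy).filter (fun p => decide (p.2 ≤ c2))).foldl
            (fun s p => PySem.Set.add s p.1) available)
          (fun j => servers.getD j.toNat 0) (fun j => j) with
      | none => acc.reverse
      | some jdx =>
        match PySem.Set.remove?
            (((PySem.Dict.items busy).filter (fun p => decide (p.2 ≤ c2))).foldl
              (fun s p => PySem.Set.add s p.1) available) jdx with
        | none => acc.reverse
        | some avail3 =>
          pvLoopB servers ts avail3
            (PySem.Dict.insert
              (((PySem.Dict.items busy).filter (fun p => decide (p.2 ≤ c2))).foldl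
                (fun d p => PySem.Dict.erase d p.1) busy) jdx (c2 + t))
            c2 (i + 1) (jdx :: acc) := by
  subst hc2; rfl

theorem pvLoop_eq (servers : List Int) (hs : servers ≠ []) :
    ∀ (tasks : List Int) (available : List Int) (busy : PySem.Dict Int Int)
      (avail : List (Int × Int)) (unavail : List (Int × Int × Int)) (curr i : Int) (acc : List Int),
      avail.Perm (available.map (pvF servers)) →
      unavail.Perm (busy.items.map (pvG servers)) →
      (available ++ busy.keys).Perm (pvRangeInts servers) →
      pvLoopA servers tasks avail unavail curr i acc =
        pvLoopB servers tasks available busy curr i acc := by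
  intro tasks
  induction tasks with
  | nil =>
    intro available busy avail unavail curr i acc _ _ _
    rw [pvLoopA, pvLoopB]
  | cons t ts ih =>
    intro available busy avail unavail curr i acc hA hU hK
    -- bookkeeping: all indices are distinct, idle and busy are disjoint
    have hndAll : (available ++ busy.keys).Nodup := hK.nodup_iff.mpr (pvRangeInts_nodup servers)
    obtain ⟨hndAv, hndK, hdisj0⟩ := List.nodup_append.mp hndAll
    have hdisj : ∀ a, a ∈ available → a ∈ busy.keys → False :=
      fun a ha hb => hdisj0 a ha a hb rfl
    have hinjOn := List.inj_on_of_nodup_map (f := Prod.fst) (l := busy.items) hndK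
    -- the two fast-forwarded times agree
    obtain ⟨c2, hc2A, hc2B, hc2w⟩ :
        ∃ c2, ((if avail.isEmpty then (pvPeek3 unavail).1 else max curr i) = c2) ∧
          ((if available.isEmpty then
              (PySem.List.min? (PySem.Dict.values busy) (fun v => v)).getD (max curr i)
            else max curr i) = c2) ∧
          (available = [] → ∃ p ∈ busy.items, p.2 ≤ c2) := by
      by_cases hav : available = []
      · have havA : avail = [] := by
          rw [hav] at hA
          simpa using hA
        have hkne : busy.keys ≠ [] := by
          intro h0
          rw [hav, h0] at hK
          have h1 : pvRangeInts servers = [] := hK.symm.eq_nil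
          unfold pvRangeInts at h1
          simp at h1
          exact hs h1
        have hine : busy.items ≠ [] := by
          intro h0
          exact hkne (by simp [PySem.Dict.keys, h0])
        have hune : unavail ≠ [] := by
          intro h0
          rw [h0] at hU
          have := hU.symm.eq_nil
          simp at this
          exact hine this
        obtain ⟨m, r, hpm⟩ := pvPopMin3_some unavail hune
        obtain ⟨hmp, hmmin⟩ := pvPopMin3_spec hpm
        have hvne : PySem.Dict.values busy ≠ [] := by
          intro h0
          apply hine
          have : busy.items.map Prod.snd = [] := h0
          simpa using this
        obtain ⟨v, hv⟩ := pvMin?_isSome (PySem.Dict.values busy) hvne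
        -- the least release time equals the least busy value
        obtain ⟨pv, hpv_mem, hpv_val⟩ : ∃ p ∈ busy.items, p.2 = v := by
          have := PySem.List.min?_mem hv
          obtain ⟨p, hp, hpe⟩ := List.mem_map.mp this
          exact ⟨p, hp, hpe⟩
        have hm_mem : m ∈ unavail := hmp.subset (List.mem_cons_self ..)
        obtain ⟨pm, hpm_mem, hpm_eq⟩ := List.mem_map.mp (hU.subset hm_mem)
        have hv_le : v ≤ m.1 := by
          have h1 : pm.2 ∈ PySem.Dict.values busy := List.mem_map_of_mem hpm_mem
          have h2 := PySem.List.min?_isMin hv _ h1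
          rw [← hpm_eq]
          exact h2
        have hm_le : m.1 ≤ v := by
          have h1 : pvG servers pv ∈ unavail :=
            hU.symm.subset (List.mem_map_of_mem hpv_mem)
          have h2 := pvLe3_first (hmmin _ h1)
          rw [show (pvG servers pv).1 = pv.2 from rfl, hpv_val] at h2
          exact h2
        have hmv : m.1 = v := le_antisymm hm_le hv_le
        refine ⟨m.1, ?_, ?_, ?_⟩
        · rw [if_pos (by simp [havA])]
          rw [pvPeek3, hpm]
        · rw [if_pos (by simp [hav]), hv]
          simp [hmv]
        · intro _
          exact ⟨pv, hpv_mem, by rw [hpv_val, hmv]⟩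
      · have havA : avail ≠ [] := by
          intro h0
          rw [h0] at hA
          apply hav
          have := hA.symm.eq_nil
          simpa using this
        refine ⟨max curr i, ?_, ?_, fun h0 => absurd h0 hav⟩
        · rw [if_neg (by simpa [List.isEmpty_iff] using havA)]
        · rw [if_neg (by simpa [List.isEmpty_iff] using hav)]
    rw [pvLoopA_cons servers t ts avail unavail curr i acc c2 hc2A,
      pvLoopB_cons servers t ts available busy curr i acc c2 hc2B]
    -- the drained idle set is `available ++ keys of the moved items`
    have hsubK : ∀ k ∈ ((busy.items.filter (fun p => decide (p.2 ≤ c2))).map Prod.fst),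
        k ∈ busy.keys := by
      intro k hk
      obtain ⟨p, hp, rfl⟩ := List.mem_map.mp hk
      exact List.mem_map_of_mem (List.mem_of_mem_filter hp)
    have hndMK : ((busy.items.filter (fun p => decide (p.2 ≤ c2))).map Prod.fst).Nodup :=
      List.Nodup.sublist (List.Sublist.map _ List.filter_sublist) hndK
    have hfoldAvail : (busy.items.filter (fun p => decide (p.2 ≤ c2))).foldl
        (fun s p => PySem.Set.add s p.1) available =
        available ++ (busy.items.filter (fun p => decide (p.2 ≤ c2))).map Prod.fst := by
      exact pvFoldAddP _ _ (fun k hk hk2 => hdisj k hk2 (hsubK k hk)) hndMK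
    -- the remaining busy dict holds exactly the items still running after c2
    have hfoldErase : ((busy.items.filter (fun p => decide (p.2 ≤ c2))).foldl
        (fun d p => PySem.Dict.erase d p.1) busy).items =
        busy.items.filter (fun p => !decide (p.2 ≤ c2)) := by
      rw [pvFoldEraseP]
      apply List.filter_congr
      intro p hp
      congr 1
      by_cases hq : p.2 ≤ c2
      · have hpm : p.1 ∈ (busy.items.filter (fun p => decide (p.2 ≤ c2))).map Prod.fst :=
          List.mem_map_of_mem (List.mem_filter.mpr ⟨hp, by simpa using hq⟩)
        simp [hpm, hq]
      · have hnm : p.1 ∉ (busy.items.filter (fun p => decide (p.2 ≤ c2))).map Prod.fst := by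
          intro hmem
          obtain ⟨q, hqm, hq1⟩ := List.mem_map.mp hmem
          have hqq := List.mem_filter.mp hqm
          have := hinjOn hqq.1 hp hq1
          subst this
          exact hq (by simpa using hqq.2)
        simp [hnm, hq]
    -- A's drained heaps match B's drained states, as multisets
    have hdr := pvDrain_spec unavail avail c2
    have hfilmap : unavail.filter (fun u => decide (u.1 ≤ c2)) |>.Perm
        ((busy.items.filter (fun p => decide (p.2 ≤ c2))).map (pvG servers)) := by
      refine (hU.filter _).trans ?_
      rw [List.filter_map]
      exact List.Perm.refl _
    have hA2 : (pvDrain avail unavail c2).1.Perm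
        ((available ++ (busy.items.filter (fun p => decide (p.2 ≤ c2))).map Prod.fst).map
          (pvF servers)) := by
      refine hdr.1.trans ?_
      rw [List.map_append]
      refine List.Perm.append hA ?_
      have h1 := hfilmap.map (fun u => (u.2.1, u.2.2))
      refine h1.trans ?_
      rw [List.map_map, List.map_map]
      exact List.Perm.refl _
    have hU2 : (pvDrain avail unavail c2).2.Perm
        ((busy.items.filter (fun p => !decide (p.2 ≤ c2))).map (pvG servers)) := by
      refine hdr.2.trans ?_
      refine (hU.filter _).trans ?_
      rw [List.filter_map]
      exact List.Perm.refl _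
    -- some server is idle at time c2
    have hav2ne : available ++ (busy.items.filter (fun p => decide (p.2 ≤ c2))).map Prod.fst ≠ [] := by
      intro h0
      obtain ⟨h1, h2⟩ := List.append_eq_nil_iff.mp h0
      obtain ⟨p, hp, hple⟩ := hc2w h1
      have : p ∈ busy.items.filter (fun p => decide (p.2 ≤ c2)) :=
        List.mem_filter.mpr ⟨hp, by simpa using hple⟩
      rw [List.map_eq_nil_iff.mp h2] at this
      simp at this
    obtain ⟨jm, hjm_eq, hjm_mem, hjm_min⟩ := pvMin2_eq servers _ hav2ne
    have hp1ne : (pvDrain avail unavail c2).1 ≠ [] := by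
      intro h0
      rw [h0] at hA2
      exact hav2ne (List.map_eq_nil_iff.mp hA2.symm.eq_nil)
    obtain ⟨wj, rest, hpop⟩ := pvPopMin2_some _ hp1ne
    obtain ⟨hpp, hpmin⟩ := pvPopMin2_spec hpop
    have hwj : wj = pvF servers jm := by
      apply pvLe2_antisymm
      · exact hpmin _ (hA2.symm.subset (List.mem_map_of_mem hjm_mem))
      · obtain ⟨j', hj', hje⟩ := List.mem_map.mp (hA2.subset (hpp.subset (List.mem_cons_self ..)))
        rw [← hje]
        exact hjm_min j' hj'
    rw [hfoldAvail, hpop, hjm_eq]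
    dsimp only
    -- the removal of the chosen index from the idle set
    have hnd2 : (available ++ (busy.items.filter (fun p => decide (p.2 ≤ c2))).map Prod.fst).Nodup := by
      rw [List.nodup_append]
      refine ⟨hndAv, hndMK, ?_⟩
      intro a ha b hb hab
      subst hab
      exact hdisj a ha (hsubK a hb)
    have hrem : PySem.Set.remove?
        (available ++ (busy.items.filter (fun p => decide (p.2 ≤ c2))).map Prod.fst) jm =
        some ((available ++ (busy.items.filter (fun p => decide (p.2 ≤ c2))).map Prod.fst).erase jm) := by
      rw [PySem.Set.remove?, if_pos (by simpa [PySem.Set.contains] using hjm_mem)]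
      congr 1
      rw [PySem.Set.discard, List.Nodup.erase_eq_filter hnd2]
      apply List.filter_congr
      intro x _
      simp [bne]
    rw [hrem]
    dsimp only
    -- the chosen index is not a key of the remaining busy dict
    have hjm_nin : ∀ p ∈ busy.items.filter (fun p => !decide (p.2 ≤ c2)), p.1 ≠ jm := by
      intro p hp hpe
      have hpi := List.mem_filter.mp hp
      rcases List.mem_append.mp hjm_mem with hja | hjb
      · rw [← hpe] at hja
        exact hdisj p.1 hja (List.mem_map_of_mem hpi.1)
      · obtain ⟨q, hqm, hq1⟩ := List.mem_map.mp hjb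
        have hqq := List.mem_filter.mp hqm
        have : q = p := hinjOn hqq.1 hpi.1 (by rw [hq1, hpe])
        subst this
        have h1 := hqq.2
        have h2 := hpi.2
        simp at h1 h2
        omega
    have hnc : ((busy.items.filter (fun p => decide (p.2 ≤ c2))).foldl
        (fun d p => PySem.Dict.erase d p.1) busy).contains jm = false := by
      rw [PySem.Dict.contains, hfoldErase]
      rw [List.any_eq_false]
      intro p hp
      simpa using hjm_nin p hp
    have hins : (PySem.Dict.insert
        ((busy.items.filter (fun p => decide (p.2 ≤ c2))).foldl
          (fun d p => PySem.Dict.erase d p.1) busy) jm (c2 + t)).items =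
        busy.items.filter (fun p => !decide (p.2 ≤ c2)) ++ [(jm, c2 + t)] := by
      rw [PySem.Dict.insert, if_neg (by simp [hnc])]
      show (((busy.items.filter (fun p => decide (p.2 ≤ c2))).foldl
          (fun d p => PySem.Dict.erase d p.1) busy).items ++ [(jm, c2 + t)]) = _
      rw [hfoldErase]
    -- recurse with the re-established invariant
    rw [hwj]
    apply ih
    · -- idle sets still match
      rw [List.map_erase (pvF_inj servers)]
      have hmm : pvF servers jm ∈ (available ++
          (busy.items.filter (fun p => decide (p.2 ≤ c2))).map Prod.fst).map (pvF servers) :=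
        List.mem_map_of_mem hjm_mem
      have hcr : (wj :: rest).Perm ((available ++
          (busy.items.filter (fun p => decide (p.2 ≤ c2))).map Prod.fst).map (pvF servers)) :=
        hpp.trans hA2
      rw [hwj] at hcr
      exact (hcr.trans (List.perm_cons_erase hmm)).cons_inv
    · -- busy dicts still match
      rw [hins, List.map_append]
      have hhd : (t + c2, (pvF servers jm).1, (pvF servers jm).2) = pvG servers (jm, c2 + t) := by
        rw [Int.add_comm t c2]
        rfl
      rw [hhd]
      refine (List.Perm.cons _ hU2).trans ?_
      show (pvG servers (jm, c2 + t) ::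
          (busy.items.filter (fun p => !decide (p.2 ≤ c2))).map (pvG servers)).Perm _
      exact (List.perm_append_singleton _ _).symm
    · -- the index partition is preserved
      have hkeys : (PySem.Dict.insert
          ((busy.items.filter (fun p => decide (p.2 ≤ c2))).foldl
            (fun d p => PySem.Dict.erase d p.1) busy) jm (c2 + t)).keys =
          (busy.items.filter (fun p => !decide (p.2 ≤ c2))).map Prod.fst ++ [jm] := by
        rw [PySem.Dict.keys, hins, List.map_append]
        rfl
      rw [hkeys]
      have e1 : ((available ++ (busy.items.filter (fun p => decide (p.2 ≤ c2))).map Prod.fst).erase jm ++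
          ((busy.items.filter (fun p => !decide (p.2 ≤ c2))).map Prod.fst ++ [jm])).Perm
          ((available ++ (busy.items.filter (fun p => decide (p.2 ≤ c2))).map Prod.fst) ++
            (busy.items.filter (fun p => !decide (p.2 ≤ c2))).map Prod.fst) := by
      -- move the trailing [jm] back into the idle part
        have h0 : ((available ++ (busy.items.filter (fun p => decide (p.2 ≤ c2))).map Prod.fst).erase jm ++
            ((busy.items.filter (fun p => !decide (p.2 ≤ c2))).map Prod.fst ++ [jm])).Perm
            (jm :: ((available ++ (busy.items.filter (fun p => decide (p.2 ≤ c2))).map Prod.fst).erase jm ++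
              (busy.items.filter (fun p => !decide (p.2 ≤ c2))).map Prod.fst)) := by
          rw [← List.append_assoc]
          exact List.perm_append_singleton _ _
        refine h0.trans ?_
        show ((jm :: (available ++ (busy.items.filter (fun p => decide (p.2 ≤ c2))).map Prod.fst).erase jm) ++
            (busy.items.filter (fun p => !decide (p.2 ≤ c2))).map Prod.fst).Perm _
        exact List.Perm.append (List.perm_cons_erase hjm_mem).symm (List.Perm.refl _)
      refine e1.trans ?_
      have h2 : ((busy.items.filter (fun p => decide (p.2 ≤ c2))).map Prod.fst ++
          (busy.items.filter (fun p => !decide (p.2 ≤ c2))).map Prod.fst).Perm busy.keys := by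
        rw [← List.map_append]
        exact (List.filter_append_perm _ busy.items).map Prod.fst
      refine List.Perm.trans ?_ hK
      rw [List.append_assoc]
      exact List.Perm.append_left available h2

-- ===== VERDICT (by name: the statement is the Claim_ definition above) =====
theorem process_tasks_spec : Claim_equal_process_tasks := by
  intro servers tasks _ hpre
  unfold Spec_process_tasks process_tasks process_tasks_alt
  cases tasks with
  | nil => simp [pvLoopA, pvLoopB]
  | cons t ts =>
    have hs : servers ≠ [] := by
      rcases hpre with h | h
      · simp at h
      · exact h
    have hof : PySem.Set.ofList ((List.range servers.length).map Int.ofNat) =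
        (List.range servers.length).map Int.ofNat := by
      show ((List.range servers.length).map Int.ofNat).foldl PySem.Set.add [] = _
      rw [pvFoldAdd _ _ (by simp)
        (show ((List.range servers.length).map Int.ofNat).Nodup from pvRangeInts_nodup servers)]
      simp
    refine pvLoop_eq servers hs _ _ _ _ _ _ _ _ ?_ ?_ ?_
    · rw [pvEnumerate_map, hof]
      have he : (List.range servers.length).map (fun j => (servers.getD j 0, (j : Int) + 0)) =
          ((List.range servers.length).map Int.ofNat).map (pvF servers) := by
        rw [List.map_map]
        apply List.map_congr_left
        intro j _
        simp [pvF]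
      rw [he]
    · simp
    · rw [hof]
      show ((List.range servers.length).map Int.ofNat ++ []).Perm (pvRangeInts servers)
      rw [List.append_nil]
      exact List.Perm.refl _
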